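-- pv_equiv track=rewrite | github.com/Yoonsik-Shin/TIL | Algorism/Programmers/코딩테스트 고득점 Kit/완전탐색/모의고사.py | solution
-- ===== SOURCE A (Python) =====
-- def solution(answers):
--     one = [1, 2, 3, 4, 5] * 2000
--     two = [2, 1, 2, 3, 2, 4, 2, 5] * 1250
--     three = [3, 3, 1, 1, 2, 2, 4, 4, 5, 5] * 1000
--     c_one, c_two, c_three = 0, 0, 0
--
--     for i in range(len(answers)):
--         if one[i] == answers[i]:
--             c_one += 1
--         if two[i] == answers[i]:
--             c_two += 1
--         if three[i] == answers[i]: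
--             c_three += 1
--
--     m = max(c_one, c_two, c_three)
--     lst = [(1, c_one), (2, c_two), (3, c_three)]
--
--     ans = []
--     for j in lst:
--         if j[1] == m:
--             ans.append(j[0])
--
--     return ans
-- ===== SOURCE B (Python) =====
-- def solution(answers):
--     # All three patterns are periodic with period 40 = lcm(5, 8, 10).
--     # Build a frequency index of (position mod 40, answer) pairs in one pass,
--     # then each student's score is 40 dictionary lookups against their cycle.
--     freq = {}
--     for i, a in enumerate(answers):
--         k = (i % 40, a)
--         freq[k] = freq.get(k, 0) + 1
--     cycles = [[1, 2, 3, 4, 5] * 8,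
--               [2, 1, 2, 3, 2, 4, 2, 5] * 5,
--               [3, 3, 1, 1, 2, 2, 4, 4, 5, 5] * 4]
--     counts = [sum(freq.get((r, cyc[r]), 0) for r in range(40)) for cyc in cycles]
--     m = max(counts)
--     return [s for s, c in enumerate(counts, 1) if c == m]
-- ===== Notes on version B (the rewrite author's own statement) =====
-- stated objective: alternative
-- what changed: Instead of comparing every answer against the patterns (A's single interleaved loop with three counters over materialised 10000-element patterns), B builds a frequency dictionary of (position mod 40, answer) pairs in one pass over answers and derives each pattern's score as a sum of 40 dictionary lookups against its period-40 cycle, then selects the winners by enumerate-filter.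
import Mathlib
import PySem

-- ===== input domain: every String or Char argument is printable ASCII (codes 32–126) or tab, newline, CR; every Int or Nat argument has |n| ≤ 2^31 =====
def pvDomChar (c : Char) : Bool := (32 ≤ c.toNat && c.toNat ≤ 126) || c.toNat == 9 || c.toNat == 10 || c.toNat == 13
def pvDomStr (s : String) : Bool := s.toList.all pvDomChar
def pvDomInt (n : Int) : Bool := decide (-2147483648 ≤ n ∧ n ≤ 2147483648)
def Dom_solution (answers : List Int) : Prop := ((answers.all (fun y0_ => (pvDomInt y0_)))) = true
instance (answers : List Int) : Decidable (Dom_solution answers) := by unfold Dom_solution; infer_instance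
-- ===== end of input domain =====

-- B replaces A's element-by-element pattern comparison with a frequency dictionary of
-- (position mod 40, answer) pairs built in one pass, scoring each period-40 cycle by 40 lookups
-- (objective: alternative algorithm, same O(n) cost).


-- ===== PORT A =====
-- Python's `lst * n` (list repetition)
def pyMulList (l : List Int) (n : Nat) : List Int := (List.replicate n l).flatten

def solution (answers : List Int) : List Int :=
  let one := pyMulList [1, 2, 3, 4, 5] 2000
  let two := pyMulList [2, 1, 2, 3, 2, 4, 2, 5] 1250
  let three := pyMulList [3, 3, 1, 1, 2, 2, 4, 4, 5, 5] 1000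
  -- pyGetD is exact here: under Pre_solution every index is in range for all four lists
  -- (the IndexError Python raises for len(answers) > 10000 is excluded by Pre_solution)
  let c := (PySem.List.pyRange 0 (answers.length : Int) 1).foldl
    (fun (c : Int × Int × Int) i =>
      (if PySem.List.pyGetD one i 0 == PySem.List.pyGetD answers i 0 then c.1 + 1 else c.1,
       if PySem.List.pyGetD two i 0 == PySem.List.pyGetD answers i 0 then c.2.1 + 1 else c.2.1,
       if PySem.List.pyGetD three i 0 == PySem.List.pyGetD answers i 0 then c.2.2 + 1 else c.2.2))
    (0, 0, 0)
  let m := max (max c.1 c.2.1) c.2.2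
  let lst : List (Int × Int) := [(1, c.1), (2, c.2.1), (3, c.2.2)]
  lst.foldl (fun ans j => if j.2 == m then ans ++ [j.1] else ans) []

-- ===== PORT B =====
def solution_alt (answers : List Int) : List Int :=
  let freq := (PySem.List.enumerate answers).foldl
    (fun (d : PySem.Dict (Int × Int) Int) ia =>
      let k := (PySem.Int.mod ia.1 40, ia.2)
      d.insert k (d.getD k 0 + 1)) PySem.Dict.empty
  let cycles : List (List Int) :=
    [pyMulList [1, 2, 3, 4, 5] 8,
     pyMulList [2, 1, 2, 3, 2, 4, 2, 5] 5,
     pyMulList [3, 3, 1, 1, 2, 2, 4, 4, 5, 5] 4]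
  let counts := cycles.map (fun cyc =>
    ((PySem.List.pyRange 0 40 1).map (fun r => freq.getD (r, PySem.List.pyGetD cyc r 0) 0)).sum)
  let m := (PySem.List.max? counts (fun x => x)).getD 0
  ((PySem.List.enumerate counts 1).filter (fun sc => sc.2 == m)).map (fun sc => sc.1)

-- ===== PRECONDITION & SPEC =====
-- Pre_ excludes len(answers) > 10000, where A raises IndexError (its patterns are materialised to length 10000).
def Pre_solution (answers : List Int) : Prop := answers.length ≤ 10000
instance (answers : List Int) : Decidable (Pre_solution answers) := by unfold Pre_solution; infer_instance
def pvWitness_solution : List Int := [1, 2, 3, 4, 5]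

def Spec_solution (answers : List Int) (out : List Int) : Prop := out = solution_alt answers
instance (answers : List Int) (out : List Int) : Decidable (Spec_solution answers out) := by unfold Spec_solution; infer_instance

-- ===== CLAIM (what is proved, stated in full; the proofs are below) =====
def Claim_equal_solution : Prop := ∀ (answers : List Int), Dom_solution answers → Pre_solution answers → Spec_solution answers (solution answers)

-- ===== LEMMAS AND PROOFS =====

-- a triple-state counting foldl is the triple of the three counting foldls
theorem foldl_triple (L : List Int) (f g h : Int → Bool) (a b c : Int) :
    L.foldl (fun (s : Int × Int × Int) i =>
        (if f i then s.1 + 1 else s.1,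
         if g i then s.2.1 + 1 else s.2.1,
         if h i then s.2.2 + 1 else s.2.2)) (a, b, c)
    = (L.foldl (fun s i => if f i then s + 1 else s) a,
       L.foldl (fun s i => if g i then s + 1 else s) b,
       L.foldl (fun s i => if h i then s + 1 else s) c) := by
  induction L generalizing a b c with
  | nil => rfl
  | cons x t ih => simp only [List.foldl_cons]; exact ih _ _ _

-- indexing into a materialised repetition = modular indexing into the base pattern
theorem getD_pyMulList (p : List Int) (k i : Nat) (h : i < p.length * k) :
    (pyMulList p k).getD i 0 = p.getD (i % p.length) 0 := by
  induction k generalizing i with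
  | zero => omega
  | succ k ih =>
    rw [Nat.mul_succ] at h
    have hp : 0 < p.length := by by_contra hc; simp at hc; simp [hc] at h
    simp only [pyMulList, List.replicate_succ, List.flatten_cons]
    by_cases hi : i < p.length
    · rw [List.getD_append _ _ _ _ hi, Nat.mod_eq_of_lt hi]
    · rw [Nat.not_lt] at hi
      rw [List.getD_append_right _ _ _ _ hi]
      have := ih (i - p.length) (by omega)
      rw [pyMulList] at this
      rw [this]
      conv_rhs => rw [show i = p.length + (i - p.length) by omega]
      rw [Nat.add_mod_left]

-- if q does not occur in R, the indicator sum over R vanishes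
theorem sum_ind_zero (g : Int → Int) (R : List Int) (q a : Int) (hq : q ∉ R) :
    (R.map (fun r => if (q, a) == (r, g r) then (1 : Int) else 0)).sum = 0 := by
  induction R with
  | nil => rfl
  | cons r t ih =>
    simp only [List.mem_cons, not_or] at hq
    simp only [List.map_cons, List.sum_cons, ih hq.2]
    have hz : ((q, a) == (r, g r)) = false := by
      rw [beq_eq_false_iff_ne]
      intro hcon
      exact hq.1 (congrArg Prod.fst hcon)
    simp [hz]

-- over a duplicate-free R containing q, the indicator sum picks exactly the r = q term
theorem sum_ind (g : Int → Int) (R : List Int) (hnd : R.Nodup) (q a : Int) (hq : q ∈ R) :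
    (R.map (fun r => if (q, a) == (r, g r) then (1 : Int) else 0)).sum
    = if g q == a then 1 else 0 := by
  induction R with
  | nil => cases hq
  | cons r t ih =>
    simp only [List.nodup_cons] at hnd
    simp only [List.map_cons, List.sum_cons]
    by_cases hrq : r = q
    · subst hrq
      rw [sum_ind_zero g t r a hnd.1]
      have heq : ((r, a) == (r, g r)) = (g r == a) := by
        by_cases hga : g r = a
        · subst hga; simp
        · have h1 : ((r, a) == (r, g r)) = false := by
            rw [beq_eq_false_iff_ne]
            intro hcon
            exact hga (congrArg Prod.snd hcon).symm
          have h2 : (g r == a) = false := by rw [beq_eq_false_iff_ne]; exact hga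
          rw [h1, h2]
      rw [heq]; ring_nf
    · have hqt : q ∈ t := by
        cases List.mem_cons.1 hq with
        | inl h => exact absurd h.symm hrq
        | inr h => exact h
      have hz : ((q, a) == (r, g r)) = false := by
        rw [beq_eq_false_iff_ne]
        intro hcon
        exact hrq (congrArg Prod.fst hcon).symm
      rw [hz, ih hnd.2 hqt]; simp

-- summing per-residue counts over a duplicate-free residue list = one countP over the pairs
theorem sum_count_eq_countP (g : Int → Int) (R : List Int) (hnd : R.Nodup)
    (L : List (Int × Int)) (hm : ∀ p ∈ L, p.1 ∈ R) :
    (R.map (fun r => ((L.count (r, g r) : Nat) : Int))).sum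
    = ((L.countP (fun p => g p.1 == p.2) : Nat) : Int) := by
  induction L with
  | nil => simp
  | cons x t ih =>
    obtain ⟨q, a⟩ := x
    have hx : q ∈ R := hm (q, a) (List.mem_cons_self)
    have hmt : ∀ p ∈ t, p.1 ∈ R := fun p hp => hm p (List.mem_cons_of_mem _ hp)
    have hcnt : ∀ r : Int, (((q, a) :: t).count (r, g r) : Int)
        = ((t.count (r, g r) : Nat) : Int) + (if ((q, a) == (r, g r)) then (1 : Int) else 0) := by
      intro r
      rw [List.count_cons]
      split_ifs <;> push_cast <;> ring
    simp only [hcnt]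
    rw [PySem.List.sum_map_add_int R (fun r => ((t.count (r, g r) : Nat) : Int))
        (fun r => if ((q, a) == (r, g r)) then (1 : Int) else 0)]
    rw [ih hmt, sum_ind g R hnd q a hx, List.countP_cons]
    simp only [Nat.cast_add]
    split_ifs <;> push_cast <;> ring

-- one counting pass of A over the materialised pattern (p tiled kA times)
-- = B's per-residue lookups against the same pattern tiled to period 40 (p tiled k40 times),
-- through the frequency list M of (i mod 40, answers[i]) pairs
theorem cnt_eq (p : List Int) (kA k40 : Nat) (hlen : p.length * k40 = 40)
    (answers : List Int) (h : answers.length ≤ p.length * kA) :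
    (PySem.List.pyRange 0 (answers.length : Int) 1).foldl
        (fun s i => if PySem.List.pyGetD (pyMulList p kA) i 0 == PySem.List.pyGetD answers i 0 then s + 1 else s) 0
    = ((PySem.List.pyRange 0 40 1).map (fun r =>
        ((((PySem.List.enumerate answers).map (fun ia => (PySem.Int.mod ia.1 40, ia.2))).count
            (r, PySem.List.pyGetD (pyMulList p k40) r 0) : Nat) : Int))).sum := by
  have hp : 0 < p.length := by
    rcases Nat.eq_zero_or_pos p.length with h0 | h0
    · rw [h0] at hlen; omega
    · exact h0
  have hdvd : p.length ∣ 40 := ⟨k40, hlen.symm⟩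
  -- right side: sum of counts → countP over the pair list → countP over indices
  rw [sum_count_eq_countP (fun r => PySem.List.pyGetD (pyMulList p k40) r 0)
      (PySem.List.pyRange 0 40 1) (PySem.List.nodup_pyRange_one 0 40)
      ((PySem.List.enumerate answers).map (fun ia => (PySem.Int.mod ia.1 40, ia.2)))
      (by
        intro q hq
        simp only [List.mem_map] at hq
        obtain ⟨ia, _, rfl⟩ := hq
        rw [PySem.List.mem_pyRange_one]
        exact ⟨PySem.Int.mod_nonneg ia.1 (by norm_num), PySem.Int.mod_lt ia.1 (by norm_num)⟩)]
  rw [List.countP_map]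
  rw [PySem.List.enumerate_eq_map_pyRange answers 0, List.countP_map]
  -- left side: counting foldl → countP over the same index range
  rw [PySem.List.foldl_count_if]
  simp only [Function.comp_def, PySem.List.len, Int.zero_add]
  congr 1
  apply List.countP_congr
  intro j hj
  have hj' := (PySem.List.mem_pyRange_one).1 hj
  obtain ⟨n, rfl⟩ : ∃ n : Nat, j = (n : Int) := ⟨j.toNat, by omega⟩
  have hn : n < answers.length := by exact_mod_cast hj'.2
  have hm40 : PySem.Int.mod ((n : Int)) 40 = ((n % 40 : Nat) : Int) := by
    exact_mod_cast PySem.Int.mod_natCast n 40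
  rw [hm40]
  simp only [PySem.List.pyGetD_natCast]
  rw [getD_pyMulList p kA n (by omega),
      getD_pyMulList p k40 (n % 40) (by rw [hlen]; exact Nat.mod_lt _ (by norm_num)),
      Nat.mod_mod_of_dvd n hdvd]

-- the final selection: A's append loop over [(1,c1),(2,c2),(3,c3)] = B's enumerate(·,1)-filter-map
theorem final_sel (c1 c2 c3 : Int) :
    ([((1:Int), c1), (2, c2), (3, c3)]).foldl
      (fun ans j => if j.2 == max (max c1 c2) c3 then ans ++ [j.1] else ans) []
    = ((PySem.List.enumerate [c1, c2, c3] 1).filter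
        (fun sc => sc.2 == (PySem.List.max? [c1, c2, c3] (fun x => x)).getD 0)).map
        (fun sc => sc.1) := by
  simp only [PySem.List.max?_id_cons, List.foldl_cons, List.foldl_nil, Option.getD_some,
    PySem.List.enumerate, List.filter_cons, List.filter_nil]
  norm_num
  split_ifs <;> simp

-- ===== VERDICT (by name: the statement is the Claim_ definition above) =====
theorem solution_spec : Claim_equal_solution := by
  intro answers _ hpre
  unfold Spec_solution solution solution_alt
  simp only
  rw [foldl_triple]
  have hfold : (PySem.List.enumerate answers).foldl
      (fun (d : PySem.Dict (Int × Int) Int) ia =>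
        d.insert (PySem.Int.mod ia.1 40, ia.2) (d.getD (PySem.Int.mod ia.1 40, ia.2) 0 + 1))
      PySem.Dict.empty
      = ((PySem.List.enumerate answers).map (fun ia => (PySem.Int.mod ia.1 40, ia.2))).foldl
        (fun (d : PySem.Dict (Int × Int) Int) k => d.insert k (d.getD k 0 + 1)) PySem.Dict.empty :=
    (List.foldl_map (f := fun ia : Int × Int => (PySem.Int.mod ia.1 40, ia.2))
      (g := fun (d : PySem.Dict (Int × Int) Int) k => d.insert k (d.getD k 0 + 1))
      (l := PySem.List.enumerate answers) (init := PySem.Dict.empty)).symm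
  have hfreq : ∀ key : Int × Int,
      (((PySem.List.enumerate answers).foldl
        (fun (d : PySem.Dict (Int × Int) Int) ia =>
          d.insert (PySem.Int.mod ia.1 40, ia.2) (d.getD (PySem.Int.mod ia.1 40, ia.2) 0 + 1))
        PySem.Dict.empty).getD key 0)
      = ((((PySem.List.enumerate answers).map (fun ia => (PySem.Int.mod ia.1 40, ia.2))).count key : Nat) : Int) := by
    intro key
    rw [hfold, PySem.Dict.getD_foldl_insert_add_one]
    simp
  simp only [List.map_cons, List.map_nil, hfreq]
  rw [cnt_eq [1, 2, 3, 4, 5] 2000 8 (by norm_num) answers (by simpa [Pre_solution] using hpre),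
      cnt_eq [2, 1, 2, 3, 2, 4, 2, 5] 1250 5 (by norm_num) answers (by simpa [Pre_solution] using hpre),
      cnt_eq [3, 3, 1, 1, 2, 2, 4, 4, 5, 5] 1000 4 (by norm_num) answers (by simpa [Pre_solution] using hpre)]
  exact final_sel _ _ _
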